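-- pv_equiv track=rewrite | github.com/NightVovy/OptimizeWithNpaNew | count_gradient/ai_experoments/202512_sdp2/get_func1.py | reduce_observable_indices
-- ===== SOURCE A (Python) =====
-- def reduce_observable_indices(indices):
--     """
--     化简可观测量序列。
--     规则: A^2 = I, 且不同方的算符对易。
--     """
--
--     def get_party(idx):
--         return 0 if idx < 2 else 1
--
--     while True:
--         made_simplification = False
--         length = len(indices)
--         if length == 0: break
--
--         i = 0
--         while i < len(indices) - 1:
--             j = i + 1
--             idx_i = indices[i]
--             idx_j = indices[j]
--             party_i = get_party(idx_i)
--             party_j = get_party(idx_j)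
--
--             # Rule 1: A^2 = I (抵消)
--             if idx_i == idx_j:
--                 indices.pop(j)
--                 indices.pop(i)
--                 made_simplification = True
--                 break
--
--             # Rule 2: 同方阻隔 (不能跨越)
--             if party_i == party_j:
--                 i += 1
--                 continue
--
--             # Rule 3: 对易性 (不同方可交换)
--             if idx_i > idx_j:
--                 indices[i], indices[j] = indices[j], indices[i]
--                 made_simplification = True
--                 break
--
--             i += 1
--         if not made_simplification: break
--
--     return indices
-- ===== SOURCE B (Python) =====
-- def reduce_observable_indices(indices):
--     """
--     化简可观测量序列。
--     规则: A^2 = I, 且不同方的算符对易。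
--     One pass: split by party preserving order, stack-cancel adjacent equal
--     operators in each party, then concatenate party-0 word before party-1 word.
--     (Note: unlike the original, this does not mutate `indices` in place;
--     the equivalence is about the return value.)
--     """
--     p0, p1 = [], []
--     for x in indices:
--         s = p0 if x < 2 else p1
--         if s and s[-1] == x:
--             s.pop()
--         else:
--             s.append(x)
--     return p0 + p1
-- ===== Notes on version B (the rewrite author's own statement) =====
-- stated objective: faster
-- what changed: Replaces A's repeated full rescans (which cancel or swap at most one adjacent pair per pass, restarting each time) by a single pass that splits the word by party preserving order, stack-cancels adjacent equal operators within each party, and concatenates the party-0 word before the party-1 word.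
import Mathlib
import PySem

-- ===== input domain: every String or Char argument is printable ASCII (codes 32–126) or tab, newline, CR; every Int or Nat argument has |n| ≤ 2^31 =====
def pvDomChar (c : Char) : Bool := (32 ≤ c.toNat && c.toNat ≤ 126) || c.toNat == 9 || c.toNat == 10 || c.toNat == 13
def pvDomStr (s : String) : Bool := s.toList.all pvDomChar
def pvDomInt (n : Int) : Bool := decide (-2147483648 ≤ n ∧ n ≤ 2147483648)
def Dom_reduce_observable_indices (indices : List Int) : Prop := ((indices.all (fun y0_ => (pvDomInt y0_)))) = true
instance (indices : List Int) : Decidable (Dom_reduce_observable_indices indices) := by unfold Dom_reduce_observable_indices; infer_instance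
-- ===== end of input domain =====

-- B replaces A's repeated rescans (one cancel/swap per pass) by a single pass: split by
-- party preserving order, stack-cancel equal neighbours per party, concatenate; the
-- equivalence is about the RETURN value (A also mutates its argument in place).

-- ===== PORT A =====
-- A's nested-function helper get_party
def pvGetParty (idx : Int) : Int := if idx < 2 then 0 else 1

-- A's inner `while i < len(indices) - 1` scan, as the obvious structural recursion over
-- the suffix at the cursor; returns (new list, made_simplification).  Branches in A's
-- order: Rule 1 cancel (pop j, pop i) + break; Rule 2 same party, advance; Rule 3 swap
-- + break; otherwise advance.
def pvInnerA : List Int → List Int × Bool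
  | a :: b :: rest =>
    if a = b then (rest, true)
    else if pvGetParty a = pvGetParty b then
      let r := pvInnerA (b :: rest); (a :: r.1, r.2)
    else if a > b then (b :: a :: rest, true)
    else
      let r := pvInnerA (b :: rest); (a :: r.1, r.2)
  | xs => (xs, false)

-- termination measure for A's outer loop: length + number of (≥2 … <2) inversions
def pvC0 (l : List Int) : Nat := (l.filter (fun x => decide (x < 2))).length
def pvC2 (l : List Int) : Nat := (l.filter (fun x => decide (2 ≤ x))).length
def pvInv : List Int → Nat
  | [] => 0
  | x :: xs => (if 2 ≤ x then pvC0 xs else 0) + pvInv xs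
def pvMu (l : List Int) : Nat := l.length + pvInv l

theorem pvC0_append (u v : List Int) : pvC0 (u ++ v) = pvC0 u + pvC0 v := by
  simp [pvC0]

theorem pvInv_append (u v : List Int) :
    pvInv (u ++ v) = pvInv u + pvInv v + pvC2 u * pvC0 v := by
  induction u with
  | nil => simp [pvInv, pvC2]
  | cons x u ih =>
    by_cases hx : 2 ≤ x <;>
      simp [pvInv, pvC2, List.filter_cons, hx, ih, pvC0_append] <;> ring

-- a successful pass either cancels an adjacent equal pair or swaps an adjacent
-- (≥2, <2) cross-party pair
theorem pvInner_true_spec : ∀ xs ys : List Int, pvInnerA xs = (ys, true) →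
    (∃ u a v, xs = u ++ a :: a :: v ∧ ys = u ++ v) ∨
    (∃ u a b v, xs = u ++ a :: b :: v ∧ 2 ≤ a ∧ b < 2 ∧ ys = u ++ b :: a :: v) := by
  intro xs
  induction xs with
  | nil => intro ys h; simp [pvInnerA] at h
  | cons a t ih =>
    cases t with
    | nil => intro ys h; simp [pvInnerA] at h
    | cons b rest =>
      intro ys h
      by_cases hab : a = b
      · subst hab
        simp [pvInnerA] at h
        exact Or.inl ⟨[], a, rest, rfl, by simp [h]⟩
      · by_cases hp : pvGetParty a = pvGetParty b
        · simp only [pvInnerA, if_neg hab, if_pos hp, Prod.mk.injEq] at h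
          have hrec : pvInnerA (b :: rest) = ((pvInnerA (b :: rest)).1, true) := by
            rw [← h.2]
          rcases ih _ hrec with ⟨u, c, v, e1, e2⟩ | ⟨u, c, d, v, e1, hc, hd, e2⟩
          · exact Or.inl ⟨a :: u, c, v, by simp [e1], by simp [← h.1, e2]⟩
          · exact Or.inr ⟨a :: u, c, d, v, by simp [e1], hc, hd, by simp [← h.1, e2]⟩
        · by_cases hgt : a > b
          · simp only [pvInnerA, if_neg hab, if_neg hp, if_pos hgt, Prod.mk.injEq] at h
            have hcb : 2 ≤ a ∧ b < 2 := by
              simp only [pvGetParty] at hp; split_ifs at hp <;> omega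
            exact Or.inr ⟨[], a, b, rest, rfl, hcb.1, hcb.2, h.1.symm⟩
          · simp only [pvInnerA, if_neg hab, if_neg hp, if_neg hgt, Prod.mk.injEq] at h
            have hrec : pvInnerA (b :: rest) = ((pvInnerA (b :: rest)).1, true) := by
              rw [← h.2]
            rcases ih _ hrec with ⟨u, c, v, e1, e2⟩ | ⟨u, c, d, v, e1, hc, hd, e2⟩
            · exact Or.inl ⟨a :: u, c, v, by simp [e1], by simp [← h.1, e2]⟩
            · exact Or.inr ⟨a :: u, c, d, v, by simp [e1], hc, hd, by simp [← h.1, e2]⟩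

theorem pvMu_cancel (u v : List Int) (a : Int) : pvMu (u ++ v) < pvMu (u ++ a :: a :: v) := by
  have h1 : pvInv v ≤ pvInv (a :: a :: v) := by
    have e : pvInv (a :: a :: v) =
        (if 2 ≤ a then pvC0 (a :: v) else 0) + ((if 2 ≤ a then pvC0 v else 0) + pvInv v) := rfl
    rw [e]; split_ifs <;> omega
  have h2 : pvC0 v ≤ pvC0 (a :: a :: v) := by
    simp only [pvC0, List.filter_cons]
    split_ifs
    all_goals try simp only [List.length_cons]
    all_goals omega
  have := Nat.mul_le_mul_left (pvC2 u) h2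
  simp only [pvMu, pvInv_append, List.length_append, List.length_cons]
  omega

theorem pvMu_swap (u v : List Int) (a b : Int) (ha : 2 ≤ a) (hb : b < 2) :
    pvMu (u ++ b :: a :: v) < pvMu (u ++ a :: b :: v) := by
  have e1 : pvInv (b :: a :: v) + 1 = pvInv (a :: b :: v) := by
    simp only [pvInv, pvC0, List.filter_cons]
    have h2 : ¬ (2 ≤ b) := by omega
    have h3 : ¬ (a < 2) := by omega
    have h4 : decide (b < 2) = true := by simpa using hb
    have h5 : decide (a < 2) = false := by simpa using h3
    simp only [if_neg h2, if_pos ha, h4, h5, if_true, if_false, List.length_cons]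
    omega
  have e2 : pvC0 (b :: a :: v) = pvC0 (a :: b :: v) := by
    simp only [pvC0, List.filter_cons]
    split_ifs
    all_goals try simp only [List.length_cons]
    all_goals omega
  simp only [pvMu, pvInv_append, List.length_append, List.length_cons, e2]
  omega

theorem pvInner_true_mu (xs ys : List Int) (h : pvInnerA xs = (ys, true)) :
    pvMu ys < pvMu xs := by
  rcases pvInner_true_spec xs ys h with ⟨u, a, v, e1, e2⟩ | ⟨u, a, b, v, e1, ha, hb, e2⟩
  · rw [e1, e2]; exact pvMu_cancel u v a
  · rw [e1, e2]; exact pvMu_swap u v a b ha hb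

-- A's outer `while True` loop
def reduce_observable_indices (indices : List Int) : List Int :=
  if _h0 : indices.length = 0 then indices
  else
    match hr : pvInnerA indices with
    | (ys, true) => reduce_observable_indices ys
    | (ys, false) => ys
termination_by pvMu indices
decreasing_by exact pvInner_true_mu _ _ hr

-- ===== PORT B =====
-- stack update of Source B: pop the top if it equals x, else push x (stack stored reversed)
def pvStackStep (s : List Int) (x : Int) : List Int :=
  match s with
  | t :: ts => if t = x then ts else x :: t :: ts
  | [] => [x]

-- Source B's loop body: route x to the stack of its party
def pvPairStep (st : List Int × List Int) (x : Int) : List Int × List Int :=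
  if x < 2 then (pvStackStep st.1 x, st.2) else (st.1, pvStackStep st.2 x)

def reduce_observable_indices_alt (indices : List Int) : List Int :=
  let p := indices.foldl pvPairStep ([], [])
  p.1.reverse ++ p.2.reverse

-- ===== PRECONDITION & SPEC =====
def Spec_reduce_observable_indices (indices : List Int) (out : List Int) : Prop := out = reduce_observable_indices_alt indices
instance (indices : List Int) (out : List Int) : Decidable (Spec_reduce_observable_indices indices out) := by unfold Spec_reduce_observable_indices; infer_instance

-- ===== CLAIM (what is proved, stated in full; the proofs are below) =====
def Claim_equal_reduce_observable_indices : Prop := ∀ (indices : List Int), Dom_reduce_observable_indices indices → Spec_reduce_observable_indices indices (reduce_observable_indices indices)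

-- ===== LEMMAS AND PROOFS =====

def pvRed (l : List Int) : List Int := l.foldl pvStackStep []

theorem pvSplit_foldl : ∀ (xs : List Int) (s0 s1 : List Int),
    xs.foldl pvPairStep (s0, s1) =
      ((xs.filter (fun x => decide (x < 2))).foldl pvStackStep s0,
       (xs.filter (fun x => !decide (x < 2))).foldl pvStackStep s1) := by
  intro xs
  induction xs with
  | nil => intro s0 s1; simp
  | cons x xs ih =>
    intro s0 s1
    by_cases hx : x < 2
    · have h1 : (decide (x < 2)) = true := by simpa using hx
      simp only [List.foldl_cons, List.filter_cons, h1, Bool.not_true, if_true, if_false,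
        pvPairStep, if_pos hx, List.foldl_cons]
      exact ih _ _
    · have h1 : (decide (x < 2)) = false := by simpa using hx
      simp only [List.foldl_cons, List.filter_cons, h1, Bool.not_false, if_true, if_false,
        pvPairStep, if_neg hx, List.foldl_cons]
      exact ih _ _

theorem pvAlt_eq (xs : List Int) :
    reduce_observable_indices_alt xs =
      (pvRed (xs.filter (fun x => decide (x < 2)))).reverse ++
      (pvRed (xs.filter (fun x => !decide (x < 2)))).reverse := by
  simp [reduce_observable_indices_alt, pvSplit_foldl, pvRed]

theorem pvStackStep_chain (s : List Int) (x : Int) (h : List.IsChain (· ≠ ·) s) :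
    List.IsChain (· ≠ ·) (pvStackStep s x) := by
  cases s with
  | nil => simp [pvStackStep]
  | cons t ts =>
    by_cases htx : t = x
    · simpa [pvStackStep, htx] using h.tail
    · simp only [pvStackStep, if_neg htx]
      exact List.isChain_cons_cons.mpr ⟨fun h' => htx h'.symm, h⟩

theorem pvFoldl_chain : ∀ (l s : List Int), List.IsChain (· ≠ ·) s →
    List.IsChain (· ≠ ·) (l.foldl pvStackStep s) := by
  intro l
  induction l with
  | nil => intro s h; simpa
  | cons x l ih => intro s h; exact ih _ (pvStackStep_chain s x h)

theorem pvCancel_two (s v : List Int) (a : Int) (h : List.IsChain (· ≠ ·) s) :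
    (a :: a :: v).foldl pvStackStep s = v.foldl pvStackStep s := by
  cases s with
  | nil => simp [List.foldl, pvStackStep]
  | cons t ts =>
    by_cases hta : t = a
    · subst hta
      cases ts with
      | nil => simp [List.foldl, pvStackStep]
      | cons r rs =>
        have hrt : r ≠ t := (List.isChain_cons_cons.mp h).1.symm
        simp [List.foldl, pvStackStep, hrt]
    · simp [List.foldl, pvStackStep, hta]

theorem pvRed_cancel (u v : List Int) (a : Int) :
    pvRed (u ++ a :: a :: v) = pvRed (u ++ v) := by
  unfold pvRed
  rw [List.foldl_append, List.foldl_append]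
  exact pvCancel_two _ v a (pvFoldl_chain u [] (by simp))

theorem pvRed_fixed : ∀ (l s : List Int), List.IsChain (· ≠ ·) (s.reverse ++ l) →
    l.foldl pvStackStep s = l.reverse ++ s := by
  intro l
  induction l with
  | nil => intro s _; simp
  | cons x l ih =>
    intro s h
    have hstep : pvStackStep s x = x :: s := by
      cases s with
      | nil => rfl
      | cons t ts =>
        have hne : t ≠ x := by
          have hj := (List.isChain_append.mp h).2.2
          exact hj t (by simp) x (by simp)
        simp [pvStackStep, hne]
    have h' : List.IsChain (· ≠ ·) ((x :: s).reverse ++ l) := by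
      simpa using h
    rw [List.foldl_cons, hstep, ih (x :: s) h']
    simp

theorem pvAlt_cancel (u v : List Int) (a : Int) :
    reduce_observable_indices_alt (u ++ a :: a :: v) = reduce_observable_indices_alt (u ++ v) := by
  rw [pvAlt_eq, pvAlt_eq]
  by_cases ha : a ≤ 1
  · simp [List.filter_append, List.filter_cons, ha, pvRed_cancel]
  · simp [List.filter_append, List.filter_cons, ha, pvRed_cancel]

theorem pvAlt_swap (u v : List Int) (a b : Int) (ha : 2 ≤ a) (hb : b < 2) :
    reduce_observable_indices_alt (u ++ a :: b :: v) = reduce_observable_indices_alt (u ++ b :: a :: v) := by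
  rw [pvAlt_eq, pvAlt_eq]
  have ha' : ¬ a ≤ 1 := by omega
  have hb' : b ≤ 1 := by omega
  simp [List.filter_append, List.filter_cons, ha', hb']

-- terminal state of A: flag false means the list is unchanged and every adjacent pair
-- is neither equal nor a (≥2, <2) inversion
theorem pvInner_false : ∀ xs ys : List Int, pvInnerA xs = (ys, false) →
    ys = xs ∧ List.IsChain (fun a b => a ≠ b ∧ ¬(2 ≤ a ∧ b < 2)) xs := by
  intro xs
  induction xs with
  | nil =>
    intro ys h
    simp only [pvInnerA, Prod.mk.injEq] at h
    exact ⟨h.1.symm, .nil⟩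
  | cons a t ih =>
    cases t with
    | nil =>
      intro ys h
      simp only [pvInnerA, Prod.mk.injEq] at h
      exact ⟨h.1.symm, .singleton a⟩
    | cons b rest =>
      intro ys h
      by_cases hab : a = b
      · simp [pvInnerA, hab] at h
      · by_cases hp : pvGetParty a = pvGetParty b
        · simp only [pvInnerA, if_neg hab, if_pos hp, Prod.mk.injEq] at h
          have hrec : pvInnerA (b :: rest) = ((pvInnerA (b :: rest)).1, false) := by
            rw [← h.2]
          obtain ⟨e, hch⟩ := ih _ hrec
          refine ⟨by rw [← h.1, e], List.isChain_cons_cons.mpr ⟨⟨hab, ?_⟩, hch⟩⟩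
          simp only [pvGetParty] at hp; split_ifs at hp <;> omega
        · by_cases hgt : a > b
          · simp [pvInnerA, hab, hp, hgt] at h
          · simp only [pvInnerA, if_neg hab, if_neg hp, if_neg hgt, Prod.mk.injEq] at h
            have hrec : pvInnerA (b :: rest) = ((pvInnerA (b :: rest)).1, false) := by
              rw [← h.2]
            obtain ⟨e, hch⟩ := ih _ hrec
            exact ⟨by rw [← h.1, e], List.isChain_cons_cons.mpr ⟨⟨hab, by omega⟩, hch⟩⟩

-- a terminal list splits into a party-0 block before a party-1 block, each with no
-- adjacent equal elements
theorem pvTerminal_split : ∀ xs : List Int,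
    List.IsChain (fun a b => a ≠ b ∧ ¬(2 ≤ a ∧ b < 2)) xs →
    ∃ u v, xs = u ++ v ∧ (∀ x ∈ u, x < 2) ∧ (∀ x ∈ v, 2 ≤ x) ∧
      List.IsChain (· ≠ ·) xs := by
  intro xs
  induction xs with
  | nil => intro _; exact ⟨[], [], rfl, by simp, by simp, .nil⟩
  | cons x xs ih =>
    intro h
    obtain ⟨u, v, e, hu, hv, _⟩ := ih h.tail
    have hxne : List.IsChain (· ≠ ·) (x :: xs) :=
      h.imp (fun _ _ h' => h'.1)
    by_cases hx : x < 2
    · refine ⟨x :: u, v, by simp [e], ?_, hv, hxne⟩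
      intro y hy
      rcases List.mem_cons.mp hy with rfl | hy'
      · exact hx
      · exact hu y hy'
    · refine ⟨[], x :: xs, rfl, by simp, ?_, hxne⟩
      intro y hy
      rcases List.mem_cons.mp hy with rfl | h2
      · omega
      · cases u with
        | nil => exact hv y (by rw [e] at h2; simpa using h2)
        | cons c cu =>
          exfalso
          have hc : c < 2 := hu c (by simp)
          obtain ⟨t, ht⟩ : ∃ t, xs = c :: t := ⟨cu ++ v, by simp [e]⟩
          have hcc := (List.isChain_cons_cons.mp (ht ▸ h)).1
          exact hcc.2 ⟨by omega, hc⟩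

theorem pvAlt_terminal (xs : List Int)
    (h : List.IsChain (fun a b => a ≠ b ∧ ¬(2 ≤ a ∧ b < 2)) xs) :
    reduce_observable_indices_alt xs = xs := by
  obtain ⟨u, v, e, hu, hv, hne⟩ := pvTerminal_split xs h
  subst e
  have hcu : List.IsChain (· ≠ ·) u := hne.left_of_append
  have hcv : List.IsChain (· ≠ ·) v := hne.right_of_append
  have hfu : u.filter (fun x => decide (x < 2)) = u :=
    List.filter_eq_self.mpr (fun x hx => by simpa using hu x hx)
  have hfu2 : u.filter (fun x => !decide (x < 2)) = [] :=
    List.filter_eq_nil_iff.mpr (fun x hx => by simpa using hu x hx)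
  have hfv : v.filter (fun x => decide (x < 2)) = [] :=
    List.filter_eq_nil_iff.mpr (fun x hx => by have := hv x hx; simp; omega)
  have hfv2 : v.filter (fun x => !decide (x < 2)) = v :=
    List.filter_eq_self.mpr (fun x hx => by have := hv x hx; simp; omega)
  rw [pvAlt_eq]
  simp only [List.filter_append, hfu, hfu2, hfv, hfv2, List.append_nil, List.nil_append]
  rw [pvRed, pvRed, pvRed_fixed u [] (by simpa using hcu),
    pvRed_fixed v [] (by simpa using hcv)]
  simp

theorem pvMain : ∀ xs : List Int,
    reduce_observable_indices xs = reduce_observable_indices_alt xs := by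
  intro xs
  induction xs using reduce_observable_indices.induct with
  | case1 xs h0 =>
    have hnil : xs = [] := List.length_eq_zero_iff.mp h0
    subst hnil
    rw [reduce_observable_indices]
    simp [reduce_observable_indices_alt]
  | case2 xs h0 ys hr ih =>
    rw [reduce_observable_indices]
    simp only [dif_neg h0]
    split
    · next ys' hr' =>
      injection hr'.symm.trans hr with e1 _
      rw [e1, ih]
      rcases pvInner_true_spec xs ys hr with ⟨u, a, v, e1, e2⟩ | ⟨u, a, b, v, e1, ha, hb, e2⟩
      · rw [e1, e2, pvAlt_cancel]
      · rw [e1, e2, ← pvAlt_swap u v a b ha hb]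
    · next ys' hr' =>
      injection hr'.symm.trans hr with _ e2
      simp at e2
  | case3 xs h0 ys hr =>
    rw [reduce_observable_indices]
    simp only [dif_neg h0]
    split
    · next ys' hr' =>
      injection hr'.symm.trans hr with _ e2
      simp at e2
    · next ys' hr' =>
      injection hr'.symm.trans hr with e1 _
      obtain ⟨e, hch⟩ := pvInner_false xs ys hr
      rw [e1, e, pvAlt_terminal xs hch]

-- ===== VERDICT (by name: the statement is the Claim_ definition above) =====
theorem reduce_observable_indices_spec : Claim_equal_reduce_observable_indices := by
  intro xs _
  unfold Spec_reduce_observable_indices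
  exact pvMain xs
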